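-- pv_equiv track=rewrite | github.com/AnonimowyBanan/advent-of-code | 2015/day3.py | __give_away_gifts
-- ===== SOURCE A (Python) =====
-- def __give_away_gifts(route: list|str):
--     locations_of_visited_houses = []
--     for direction in route:
--         x, y = locations_of_visited_houses[-1] if len(locations_of_visited_houses) > 0 else [0, 0]
--         if direction == '^':
--             y -= 1
--         if direction == '>':
--             x += 1
--         if direction == 'v':
--             y += 1
--         if direction == '<':
--             x -= 1
--         locations_of_visited_houses.append([x, y])
--     return locations_of_visited_houses
-- ===== SOURCE B (Python) =====
-- def __give_away_gifts(route: list | str):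
--     def delta(c):
--         return (c == '>') - (c == '<'), (c == 'v') - (c == '^')
--
--     def traj(seq):
--         # positions relative to the start of seq, by divide and conquer:
--         # trajectory(seq) = trajectory(left half) ++ trajectory(right half)
--         # translated by the left half's endpoint
--         if len(seq) == 1:
--             return [delta(seq[0])]
--         mid = len(seq) // 2
--         left = traj(seq[:mid])
--         ex, ey = left[-1]
--         return left + [(x + ex, y + ey) for (x, y) in traj(seq[mid:])]
--
--     if not route:
--         return []
--     return [list(p) for p in traj(route)]
-- ===== Notes on version B (the rewrite author's own statement) =====
-- stated objective: alternative
-- what changed: B computes the trajectory by divide and conquer: it recursively builds the trajectory of each half of the route and translates the right half's trajectory by the left half's endpoint, instead of A's single left-to-right pass that re-reads the last appended position and threads x,y through four if-statements.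
import Mathlib
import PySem

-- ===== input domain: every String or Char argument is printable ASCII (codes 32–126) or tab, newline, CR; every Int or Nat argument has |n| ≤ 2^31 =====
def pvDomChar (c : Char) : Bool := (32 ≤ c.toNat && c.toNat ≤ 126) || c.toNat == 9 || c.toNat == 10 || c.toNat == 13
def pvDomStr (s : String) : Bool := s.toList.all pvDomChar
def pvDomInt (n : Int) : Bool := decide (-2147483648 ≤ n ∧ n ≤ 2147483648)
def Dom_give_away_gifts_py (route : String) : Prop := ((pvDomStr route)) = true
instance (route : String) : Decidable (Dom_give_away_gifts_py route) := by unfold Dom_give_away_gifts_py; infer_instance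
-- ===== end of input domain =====

-- B replaces A's left-to-right pass (re-reading the output list's last element through four
-- sequential if-statements) by divide and conquer: the trajectory of a route is the trajectory
-- of its left half followed by the trajectory of its right half translated by the left half's
-- endpoint (objective: alternative).

-- ===== PORT A =====
-- one loop iteration of A: read locations[-1] (or [0,0]), apply the four ifs, append
def gagStep (locs : List (List Int)) (direction : Char) : List (List Int) :=
  match (if locs.length > 0 then (PySem.List.pyGet? locs (-1)).getD [0, 0] else [0, 0]) with
  | x0 :: y0 :: _ =>
    let y1 := if direction = '^' then y0 - 1 else y0
    let x1 := if direction = '>' then x0 + 1 else x0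
    let y2 := if direction = 'v' then y1 + 1 else y1
    let x2 := if direction = '<' then x1 - 1 else x1
    locs ++ [[x2, y2]]
  | _ => locs   -- unreachable: x, y = … always unpacks a 2-element list

def give_away_gifts_py (route : String) : List (List Int) :=
  route.toList.foldl gagStep []

-- ===== PORT B =====
-- (c == '>') - (c == '<'), (c == 'v') - (c == '^')  (Python bool arithmetic)
def gagDelta (c : Char) : Int × Int :=
  ((if c = '>' then 1 else 0) - (if c = '<' then 1 else 0),
   (if c = 'v' then 1 else 0) - (if c = '^' then 1 else 0))

-- traj(seq): trajectory(left half) ++ trajectory(right half) translated by left half's endpoint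
def gagTraj : List Char → List (Int × Int)
  | [] => []          -- unreachable: B only calls traj on nonempty sequences
  | [c] => [gagDelta c]
  | a :: b :: rest =>
      let mid := (a :: b :: rest).length / 2
      let left := gagTraj ((a :: b :: rest).take mid)
      match left.getLast? with
      | some e => left ++ (gagTraj ((a :: b :: rest).drop mid)).map (fun q => (q.1 + e.1, q.2 + e.2))
      | none => left  -- unreachable: left[-1] always exists
  termination_by l => l.length
  decreasing_by
    · simp; omega
    · simp; omega

def give_away_gifts_py_alt (route : String) : List (List Int) :=
  if route.toList = [] then []
  else (gagTraj route.toList).map (fun p => [p.1, p.2])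

-- ===== PRECONDITION & SPEC =====
def Spec_give_away_gifts_py (route : String) (out : List (List Int)) : Prop := out = give_away_gifts_py_alt route
instance (route : String) (out : List (List Int)) : Decidable (Spec_give_away_gifts_py route out) := by unfold Spec_give_away_gifts_py; infer_instance

-- ===== CLAIM (what is proved, stated in full; the proofs are below) =====
def Claim_equal_give_away_gifts_py : Prop := ∀ (route : String), Dom_give_away_gifts_py route → Spec_give_away_gifts_py route (give_away_gifts_py route)

-- ===== LEMMAS AND PROOFS =====

-- reference prefix-sum of the deltas (proof-only helper: both ports are reduced to it)
def gagAccum (p : Int × Int) : List (Int × Int) → List (Int × Int)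
  | [] => []
  | d :: ds =>
    let q := (p.1 + d.1, p.2 + d.2)
    q :: gagAccum q ds

-- one step of A, applied to a list whose "last or [0,0]" is [p.1, p.2]
theorem gagStep_eq (locs : List (List Int)) (p : Int × Int) (c : Char)
    (h : (if locs.length > 0 then (PySem.List.pyGet? locs (-1)).getD [0, 0] else [0, 0]) = [p.1, p.2]) :
    gagStep locs c = locs ++ [[(p.1 + (gagDelta c).1, p.2 + (gagDelta c).2).1,
                               (p.1 + (gagDelta c).1, p.2 + (gagDelta c).2).2]] := by
  unfold gagStep gagDelta
  rw [h]
  split_ifs <;> simp_all <;> omega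

theorem gag_invariant (l : List Char) (p : Int × Int) (locs : List (List Int))
    (h : (if locs.length > 0 then (PySem.List.pyGet? locs (-1)).getD [0, 0] else [0, 0]) = [p.1, p.2]) :
    l.foldl gagStep locs = locs ++ (gagAccum p (l.map gagDelta)).map (fun q => [q.1, q.2]) := by
  induction l generalizing p locs with
  | nil => simp [gagAccum]
  | cons c cs ih =>
    have hstep := gagStep_eq locs p c h
    simp only [List.foldl_cons, List.map_cons, gagAccum, hstep]
    rw [ih (p.1 + (gagDelta c).1, p.2 + (gagDelta c).2)]
    · simp
    · simp [PySem.List.pyGet?_neg_one_append_singleton]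

theorem gagAccum_ne_nil (p : Int × Int) (ds : List (Int × Int)) (h : ds ≠ []) :
    gagAccum p ds ≠ [] := by
  cases ds with
  | nil => exact absurd rfl h
  | cons d ds => simp [gagAccum]

-- translation: accumulating from p is accumulating from the origin, shifted by p
theorem gagAccum_translate (ds : List (Int × Int)) (p : Int × Int) :
    gagAccum p ds = (gagAccum (0, 0) ds).map (fun q => (q.1 + p.1, q.2 + p.2)) := by
  induction ds generalizing p with
  | nil => simp [gagAccum]
  | cons d ds ih =>
    simp only [gagAccum, List.map_cons, zero_add]
    congr 1
    · simp only [Prod.mk.injEq]; constructor <;> ring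
    · rw [ih (p.1 + d.1, p.2 + d.2), ih (d.1, d.2), List.map_map]
      apply List.map_congr_left
      intro q _
      simp only [Function.comp_apply, Prod.mk.injEq]
      constructor <;> ring

-- splitting: accumulate a concatenation = accumulate each part, the second from the
-- first part's endpoint
theorem gagAccum_append (d1 d2 : List (Int × Int)) (p : Int × Int) :
    gagAccum p (d1 ++ d2) = gagAccum p d1 ++ gagAccum ((gagAccum p d1).getLastD p) d2 := by
  induction d1 generalizing p with
  | nil => simp [gagAccum]
  | cons d ds ih =>
    simp only [List.cons_append, gagAccum, List.getLastD_cons]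
    rw [ih]

-- B's divide and conquer computes the reference prefix-sum
theorem gagTraj_eq (n : Nat) : ∀ l : List Char, l.length ≤ n → l ≠ [] →
    gagTraj l = gagAccum (0, 0) (l.map gagDelta) := by
  induction n with
  | zero => intro l hl hne; cases l with
      | nil => exact absurd rfl hne
      | cons a t => simp at hl
  | succ n ih =>
    intro l hl hne
    match l with
    | [c] => simp [gagTraj, gagAccum]
    | a :: b :: rest =>
      rw [gagTraj]
      set L := a :: b :: rest with hL
      have hlen : 2 ≤ L.length := by simp [hL]
      set mid := L.length / 2 with hmid
      have hmid1 : 1 ≤ mid := by omega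
      have hmidlt : mid < L.length := by omega
      have htake_len : (L.take mid).length = mid := by simp; omega
      have hdrop_len : (L.drop mid).length = L.length - mid := by simp
      have htake_ne : L.take mid ≠ [] := by
        intro hcon; rw [← List.length_eq_zero_iff] at hcon; omega
      have hdrop_ne : L.drop mid ≠ [] := by
        intro hcon; rw [← List.length_eq_zero_iff] at hcon; omega
      have hltake := ih (L.take mid) (by omega) htake_ne
      have hldrop := ih (L.drop mid) (by simp [hdrop_len]; omega) hdrop_ne
      simp only [hltake, hldrop]
      have hne' : gagAccum (0, 0) ((L.take mid).map gagDelta) ≠ [] :=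
        gagAccum_ne_nil _ _ (by simp; omega)
      have hsome : (gagAccum (0, 0) ((L.take mid).map gagDelta)).getLast? ≠ none := by
        rw [Ne, List.getLast?_eq_none_iff]; exact hne'
      obtain ⟨e, he⟩ := Option.ne_none_iff_exists'.mp hsome
      rw [he]
      have hsplit : L.map gagDelta = (L.take mid).map gagDelta ++ (L.drop mid).map gagDelta := by
        rw [← List.map_append, List.take_append_drop]
      rw [hsplit, gagAccum_append]
      have hlastD : (gagAccum (0, 0) ((L.take mid).map gagDelta)).getLastD (0, 0) = e := by
        rw [List.getLastD_eq_getLast?, he]; rfl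
      rw [hlastD, gagAccum_translate _ e]

-- ===== VERDICT (by name: the statement is the Claim_ definition above) =====
theorem give_away_gifts_py_spec : Claim_equal_give_away_gifts_py := by
  intro route _
  unfold Spec_give_away_gifts_py give_away_gifts_py give_away_gifts_py_alt
  rw [gag_invariant route.toList (0, 0) [] (by simp)]
  by_cases h : route.toList = []
  · simp [h, gagAccum]
  · rw [if_neg h, gagTraj_eq route.toList.length route.toList le_rfl h, List.nil_append]
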